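-- pv_equiv track=rewrite | github.com/Robbierayrob/business-scraper | google_maps_scraper.py | get_primary_business_type
-- ===== SOURCE A (Python) =====
-- def get_primary_business_type(types):
--     """Get the most relevant business type from the types list"""
--     if not types:
--         return 'unknown'
--
--     # Prefer restaurant-related types first
--     restaurant_types = ['restaurant', 'food', 'cafe', 'meal_takeaway', 'meal_delivery']
--     for t in types:
--         if t in restaurant_types:
--             return t
--
--     # Return the first non-generic type
--     generic_types = ['point_of_interest', 'establishment']
--     for t in types:
--         if t not in generic_types:
--             return t
--
--     return types[0]  # fallback to first type if all are generic
-- ===== SOURCE B (Python) =====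
-- def get_primary_business_type(types):
--     """Get the most relevant business type from the types list (single pass)."""
--     if not types:
--         return 'unknown'
--     restaurant_types = {'restaurant', 'food', 'cafe', 'meal_takeaway', 'meal_delivery'}
--     generic_types = {'point_of_interest', 'establishment'}
--     first_non_generic = None
--     for t in types:
--         if t in restaurant_types:
--             return t
--         if first_non_generic is None and t not in generic_types:
--             first_non_generic = t
--     return first_non_generic if first_non_generic is not None else types[0]
-- ===== Notes on version B (the rewrite author's own statement) =====
-- stated objective: alternative
-- what changed: Replaces A's two separate scans (restaurant pass, then non-generic pass) by a single traversal carrying a first_non_generic accumulator, falling back to types[0].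
import Mathlib
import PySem

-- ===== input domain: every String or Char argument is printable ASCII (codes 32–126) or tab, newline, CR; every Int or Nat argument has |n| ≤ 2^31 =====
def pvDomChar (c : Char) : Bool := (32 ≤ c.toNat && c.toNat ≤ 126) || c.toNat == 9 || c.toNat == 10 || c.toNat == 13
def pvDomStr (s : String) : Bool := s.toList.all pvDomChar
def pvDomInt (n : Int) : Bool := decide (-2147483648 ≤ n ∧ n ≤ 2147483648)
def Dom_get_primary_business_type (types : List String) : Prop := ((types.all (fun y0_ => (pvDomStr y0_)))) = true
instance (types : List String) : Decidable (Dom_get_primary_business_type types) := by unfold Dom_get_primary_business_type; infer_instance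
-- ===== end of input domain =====

-- B replaces A's two separate scans by one traversal carrying a first-non-generic
-- accumulator (objective: alternative decomposition; same asymptotic cost).

-- ===== PORT A =====
def pvRestaurantTypes : List String :=
  ["restaurant", "food", "cafe", "meal_takeaway", "meal_delivery"]

def pvGenericTypes : List String := ["point_of_interest", "establishment"]

-- first loop of A: return the first restaurant-related type, if any
def pvAFindRest : List String → Option String
  | [] => none
  | t :: ts => if t ∈ pvRestaurantTypes then some t else pvAFindRest ts

-- second loop of A: return the first non-generic type, if any
def pvAFindNonGen : List String → Option String
  | [] => none
  | t :: ts => if t ∉ pvGenericTypes then some t else pvAFindNonGen ts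

def get_primary_business_type (types : List String) : String :=
  match types with
  | [] => "unknown"                                   -- if not types: return 'unknown'
  | t0 :: _ =>
    match pvAFindRest types with
    | some t => t
    | none =>
      match pvAFindNonGen types with
      | some t => t
      | none => t0                                    -- types[0]; list known nonempty here

-- ===== PORT B =====
-- single pass: return t on a restaurant hit, record the first non-generic type;
-- after the loop, fall back to first_non_generic or types[0] (fb)
def pvBLoop (fng : Option String) (fb : String) : List String → String
  | [] => fng.getD fb
  | t :: ts =>
    if t ∈ pvRestaurantTypes then t
    else pvBLoop (if fng = none ∧ t ∉ pvGenericTypes then some t else fng) fb ts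

def get_primary_business_type_alt (types : List String) : String :=
  match types with
  | [] => "unknown"
  | t0 :: _ => pvBLoop none t0 types

-- ===== PRECONDITION & SPEC =====
def Spec_get_primary_business_type (types : List String) (out : String) : Prop := out = get_primary_business_type_alt types
instance (types : List String) (out : String) : Decidable (Spec_get_primary_business_type types out) := by unfold Spec_get_primary_business_type; infer_instance

-- ===== CLAIM (what is proved, stated in full; the proofs are below) =====
def Claim_equal_get_primary_business_type : Prop := ∀ (types : List String), Dom_get_primary_business_type types → Spec_get_primary_business_type types (get_primary_business_type types)

-- ===== LEMMAS AND PROOFS =====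
theorem pvBLoop_eq (l : List String) (fng : Option String) (fb : String) :
    pvBLoop fng fb l =
      match pvAFindRest l with
      | some t => t
      | none =>
        match fng with
        | some a => a
        | none =>
          match pvAFindNonGen l with
          | some t => t
          | none => fb := by
  induction l generalizing fng with
  | nil => cases fng <;> simp [pvBLoop, pvAFindRest, pvAFindNonGen, Option.getD]
  | cons t ts ih =>
    by_cases hr : t ∈ pvRestaurantTypes
    · simp [pvBLoop, pvAFindRest, hr]
    · cases fng with
      | some a => simp [pvBLoop, pvAFindRest, hr, ih]
      | none =>
        by_cases hg : t ∈ pvGenericTypes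
        · simp [pvBLoop, pvAFindRest, pvAFindNonGen, hr, hg, ih]
        · simp [pvBLoop, pvAFindRest, pvAFindNonGen, hr, hg, ih]

-- ===== VERDICT (by name: the statement is the Claim_ definition above) =====
theorem get_primary_business_type_spec : Claim_equal_get_primary_business_type := by
  intro types _
  unfold Spec_get_primary_business_type
  cases types with
  | nil => rfl
  | cons t0 ts =>
    simp only [get_primary_business_type, get_primary_business_type_alt, pvBLoop_eq]
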